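-- pv_equiv track=rewrite | github.com/AussieSeaweed/index-librorum-prohibitorum | dmoj/dmopc20c6p2/main.py | solve
-- ===== SOURCE A (Python) =====
-- def solve(N, A, B):
--     X = [i for i in range(N) if A[i]]
--     Y = [i for i in range(N) if B[i]]
--     strokes = []
--
--     while Y:
--         n = 0
--
--         while n < len(Y) and Y[-n - 1] == Y[-1] - n:
--             n += 1
--
--         if len(X) < n:
--             return None
--
--         L = []
--         R = []
--
--         for i in range(n):
--             L.append(X.pop())
--             R.append(Y.pop())
--
--         if any(l > r for l, r in zip(L, R)):
--             return None
--         elif L != R: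
--             strokes.append((L[-1], R[0]))
--
--     if X:
--         return None
--
--     return strokes
-- ===== SOURCE B (Python) =====
-- def solve(N, A, B):
--     X = [i for i in range(N) if A[i]]
--     Y = [i for i in range(N) if B[i]]
--
--     # decompose Y into maximal runs of consecutive integers, one forward scan;
--     # runs_rev holds the run lengths with the LAST run of Y first
--     runs_rev = []
--     prev = None
--     for y in Y:
--         if runs_rev and y == prev + 1:
--             runs_rev[0] += 1
--         else:
--             runs_rev.insert(0, 1)
--         prev = y
--
--     strokes = []
--     xe, ye = len(X), len(Y)
--     for n in runs_rev:
--         if xe < n: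
--             return None
--         xs, ys = X[xe - n:xe], Y[ye - n:ye]
--         if any(x > y for x, y in zip(xs, ys)):
--             return None
--         if xs != ys:
--             strokes.append((xs[0], ys[-1]))
--         xe -= n
--         ye -= n
--
--     if xe:
--         return None
--
--     return strokes
-- ===== Notes on version B (the rewrite author's own statement) =====
-- stated objective: alternative
-- what changed: B replaces A's destructive pop-driven outer/inner while loops by a different decomposition: one forward scan groups Y into maximal consecutive-run lengths, then a single pointer loop walks the runs from the end comparing non-destructive slices of the intact X and Y.
import Mathlib
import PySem

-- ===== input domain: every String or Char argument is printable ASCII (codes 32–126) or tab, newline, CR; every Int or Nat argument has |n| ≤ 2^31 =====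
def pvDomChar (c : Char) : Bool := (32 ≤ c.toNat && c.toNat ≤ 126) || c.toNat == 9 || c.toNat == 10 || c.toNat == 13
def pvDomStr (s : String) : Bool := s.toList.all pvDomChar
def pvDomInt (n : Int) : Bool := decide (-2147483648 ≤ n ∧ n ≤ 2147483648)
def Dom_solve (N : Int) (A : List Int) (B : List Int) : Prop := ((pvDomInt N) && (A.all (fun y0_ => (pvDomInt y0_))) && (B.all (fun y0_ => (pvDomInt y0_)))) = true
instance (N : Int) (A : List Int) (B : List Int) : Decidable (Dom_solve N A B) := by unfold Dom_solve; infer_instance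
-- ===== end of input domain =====

-- B re-implements A by a different decomposition: one forward scan groups Y into maximal
-- consecutive runs, then a pointer loop over non-destructive slices replaces A's pop-driven
-- destructive loop; equal return value on all inputs where A returns (Pre_solve).

-- ===== PORT A =====
-- inner while: n = 0; while n < len(Y) and Y[-n-1] == Y[-1] - n: n += 1
-- (Y[-1] is fixed during the loop and passed as `last`; pyGetD is exact since n < len(Y))
def runLenA (Y : List Int) (last : Int) (n : Nat) : Nat :=
  if n < Y.length ∧ PySem.List.pyGetD Y (-(n : Int) - 1) 0 = last - n then
    runLenA Y last (n + 1)
  else n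
termination_by Y.length - n
decreasing_by omega

-- for i in range(n): acc.append(xs.pop())   (pop from the end; returns (xs, acc))
def popLoopA : Nat → List Int → List Int → (List Int × List Int)
  | 0, xs, acc => (xs, acc)
  | n + 1, xs, acc => popLoopA n xs.dropLast (acc ++ [xs.getLastD 0])

-- lemmas the outer loop's termination needs (cited in decreasing_by)
theorem runLenA_le (Y : List Int) (last : Int) (n : Nat) (h : n ≤ Y.length) :
    runLenA Y last n ≤ Y.length := by
  unfold runLenA
  split
  · exact runLenA_le Y last (n + 1) (by omega)
  · exact h
termination_by Y.length - n
decreasing_by omega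

theorem runLenA_ge (Y : List Int) (last : Int) (n : Nat) : n ≤ runLenA Y last n := by
  unfold runLenA
  split
  · have h := runLenA_ge Y last (n + 1); omega
  · omega
termination_by Y.length - n
decreasing_by omega

theorem runLenA_pos (Y : List Int) (hY : Y ≠ []) :
    1 ≤ runLenA Y (PySem.List.pyGetD Y (-1) 0) 0 := by
  have hlen : 0 < Y.length := List.length_pos_iff.mpr hY
  rw [runLenA]
  have hc : 0 < Y.length ∧ PySem.List.pyGetD Y (-(0 : Nat) - 1 : Int) 0
      = PySem.List.pyGetD Y (-1) 0 - ((0 : Nat) : Int) := by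
    refine ⟨hlen, by norm_num⟩
  rw [if_pos hc]
  exact runLenA_ge Y _ 1

theorem popLoopA_fst_len (n : Nat) (xs acc : List Int) (h : n ≤ xs.length) :
    (popLoopA n xs acc).1.length = xs.length - n := by
  induction n generalizing xs acc with
  | zero => simp [popLoopA]
  | succ k ih =>
    simp only [popLoopA]
    rw [ih _ _ (by simp [List.length_dropLast]; omega)]
    simp [List.length_dropLast]; omega

def loopA (X Y : List Int) (strokes : List (Int × Int)) : Option (List (Int × Int)) :=
  if hY : Y = [] then
    if X ≠ [] then none else some strokes
  else
    let n := runLenA Y (PySem.List.pyGetD Y (-1) 0) 0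
    if X.length < n then none
    else
      let PX := popLoopA n X []
      let PY := popLoopA n Y []
      let L := PX.2
      let R := PY.2
      if (L.zip R).any (fun p => decide (p.1 > p.2)) then none
      else if L ≠ R then loopA PX.1 PY.1 (strokes ++ [(L.getLastD 0, R.headD 0)])
      else loopA PX.1 PY.1 strokes
termination_by Y.length
decreasing_by
  all_goals
    have h1 := runLenA_pos Y hY
    have h2 := runLenA_le Y (PySem.List.pyGetD Y (-1) 0) 0 (Nat.zero_le _)
    have h3 := popLoopA_fst_len (runLenA Y (PySem.List.pyGetD Y (-1) 0) 0) Y [] h2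
    simp only [] at h3 ⊢
    omega

def solve (N : Int) (A : List Int) (B : List Int) : Option (List (Int × Int)) :=
  let X := (PySem.List.pyRange 0 N 1).filter (fun i => PySem.List.pyGetD A i 0 ≠ 0)
  let Y := (PySem.List.pyRange 0 N 1).filter (fun i => PySem.List.pyGetD B i 0 ≠ 0)
  loopA X Y []

-- ===== PORT B =====
-- forward scan of Y building the run lengths, newest (= last) run at the head;
-- state is (runs_rev, prev); `runs_rev and y == prev + 1` → head non-empty test
def runStep (s : List Nat × Int) (y : Int) : List Nat × Int :=
  match s.1 with
  | r :: rest => if y = s.2 + 1 then ((r + 1) :: rest, y) else (1 :: r :: rest, y)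
  | [] => ([1], y)

def runsRev (Y : List Int) : List Nat := (Y.foldl runStep ([], 0)).1

-- for n in runs_rev: … with shrinking end pointers xe, ye into the intact X, Y
def loopB (X Y : List Int) : List Nat → Nat → Nat → List (Int × Int) → Option (List (Int × Int))
  | [], xe, _, strokes => if xe ≠ 0 then none else some strokes
  | n :: rest, xe, ye, strokes =>
    if xe < n then none
    else
      let xs := PySem.List.slice X (some ((xe : Int) - n)) (some (xe : Int))
      let ys := PySem.List.slice Y (some ((ye : Int) - n)) (some (ye : Int))
      if (xs.zip ys).any (fun p => decide (p.1 > p.2)) then none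
      else if xs ≠ ys then
        loopB X Y rest (xe - n) (ye - n) (strokes ++ [(xs.headD 0, ys.getLastD 0)])
      else loopB X Y rest (xe - n) (ye - n) strokes

def solve_alt (N : Int) (A : List Int) (B : List Int) : Option (List (Int × Int)) :=
  let X := (PySem.List.pyRange 0 N 1).filter (fun i => PySem.List.pyGetD A i 0 ≠ 0)
  let Y := (PySem.List.pyRange 0 N 1).filter (fun i => PySem.List.pyGetD B i 0 ≠ 0)
  loopB X Y (runsRev Y) X.length Y.length []

-- ===== PRECONDITION & SPEC =====
-- Pre_: the comprehensions index A[i], B[i] for every i in range(N); Python raises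
-- IndexError exactly when N exceeds either length (both A and B raise there alike).
def Pre_solve (N : Int) (A : List Int) (B : List Int) : Prop :=
  N ≤ (A.length : Int) ∧ N ≤ (B.length : Int)
instance (N : Int) (A : List Int) (B : List Int) : Decidable (Pre_solve N A B) := by
  unfold Pre_solve; infer_instance

def pvWitness_solve : Int × List Int × List Int := (4, [1, 0, 1, 1], [0, 1, 1, 1])

def Spec_solve (N : Int) (A : List Int) (B : List Int) (out : Option (List (Int × Int))) : Prop := out = solve_alt N A B
instance (N : Int) (A : List Int) (B : List Int) (out : Option (List (Int × Int))) : Decidable (Spec_solve N A B out) := by unfold Spec_solve; infer_instance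

-- ===== CLAIM (what is proved, stated in full; the proofs are below) =====
def Claim_equal_solve : Prop := ∀ (N : Int) (A : List Int) (B : List Int), Dom_solve N A B → Pre_solve N A B → Spec_solve N A B (solve N A B)

-- ===== LEMMAS AND PROOFS =====

theorem snoc_getElem (Z : List Int) (y : Int) (i j : Nat) (h : i = j) (hj : j < Z.length)
    (hiw : i < (Z ++ [y]).length) : (Z ++ [y])[i] = Z[j] := by
  subst h
  exact List.getElem_append_left hj

theorem getElem_last_getLastD (Z : List Int) (h : Z ≠ []) (hl : Z.length - 1 < Z.length) :
    Z[Z.length - 1] = Z.getLastD 0 := by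
  rw [← List.getLast_eq_getElem h, List.getLastD_eq_getLast?, List.getLast?_eq_some_getLast h]
  rfl

theorem runStep_snd (s : List Nat × Int) (y : Int) : (runStep s y).2 = y := by
  rcases s with ⟨l, p⟩
  cases l with
  | nil => rfl
  | cons r rest =>
    simp only [runStep]
    split <;> rfl

theorem runStep_cons_fst (r : Nat) (rest : List Nat) (p y : Int) :
    (runStep (r :: rest, p) y).1 = if y = p + 1 then (r + 1) :: rest else 1 :: r :: rest := by
  simp only [runStep]
  split <;> rfl

-- pops: (popLoopA n xs acc) keeps the first (len-n) elements and appends the last n, reversed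
theorem popLoopA_spec (n : Nat) : ∀ (xs acc : List Int), n ≤ xs.length →
    (popLoopA n xs acc).1 = xs.take (xs.length - n) ∧
    (popLoopA n xs acc).2 = acc ++ (xs.drop (xs.length - n)).reverse := by
  induction n with
  | zero => intro xs acc _; simp [popLoopA]
  | succ k ih =>
    intro xs acc h
    cases xs using List.reverseRecOn with
    | nil => simp at h
    | append_singleton ys x =>
      have hk : k ≤ ys.length := by simp at h; omega
      have hlen : (ys ++ [x]).length = ys.length + 1 := by simp
      simp only [popLoopA, List.dropLast_concat, List.getLastD_concat]
      obtain ⟨h1, h2⟩ := ih ys (acc ++ [x]) hk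
      constructor
      · rw [h1, hlen]
        have : ys.length + 1 - (k + 1) = ys.length - k := by omega
        rw [this, List.take_append_of_le_length (by omega)]
      · rw [h2, hlen]
        have : ys.length + 1 - (k + 1) = ys.length - k := by omega
        rw [this, List.drop_append_of_le_length (by omega)]
        simp

theorem pyGetD_neg_one_getLastD (Z : List Int) (h : Z ≠ []) :
    PySem.List.pyGetD Z (-1) 0 = Z.getLastD 0 := by
  rw [PySem.List.pyGetD_neg_one Z 0 h, List.getLastD_eq_getLast?,
    List.getLast?_eq_some_getLast h]
  rfl

-- shifting the inner while across an appended last element, inside a continuing run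
theorem runLenA_shift (Z : List Int) (y last : Int) (hy : y = last + 1) (n : Nat) :
    runLenA (Z ++ [y]) y (n + 1) = runLenA Z last n + 1 := by
  conv_lhs => rw [runLenA]
  conv_rhs => rw [runLenA]
  by_cases hc : n < Z.length ∧ PySem.List.pyGetD Z (-(n : Int) - 1) 0 = last - n
  · have hsh : PySem.List.pyGetD (Z ++ [y]) (-((n + 1 : Nat) : Int) - 1) 0
        = PySem.List.pyGetD Z (-(n : Int) - 1) 0 := by
      have e1 : (-((n + 1 : Nat) : Int) - 1) = -(((n + 2 : Nat)) : Int) := by push_cast; ring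
      have e2 : (-(n : Int) - 1) = -(((n + 1 : Nat)) : Int) := by push_cast; ring
      rw [e1, e2,
        PySem.List.pyGetD_neg_natCast (Z ++ [y]) (n + 2) 0 (by omega) (by simp only [List.length_append, List.length_cons, List.length_nil]; omega),
        PySem.List.pyGetD_neg_natCast Z (n + 1) 0 (by omega) (by omega)]
      exact snoc_getElem Z y _ (Z.length - (n + 1)) (by simp only [List.length_append, List.length_cons, List.length_nil]; omega) (by omega) (by simp only [List.length_append, List.length_cons, List.length_nil]; omega)
    have hc' : n + 1 < (Z ++ [y]).length ∧
        PySem.List.pyGetD (Z ++ [y]) (-((n + 1 : Nat) : Int) - 1) 0 = y - ((n + 1 : Nat) : Int) := by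
      refine ⟨by simp only [List.length_append, List.length_cons, List.length_nil]; omega, ?_⟩
      rw [hsh, hc.2, hy]; push_cast; ring
    rw [if_pos hc', if_pos hc]
    exact runLenA_shift Z y last hy (n + 1)
  · have hc' : ¬ (n + 1 < (Z ++ [y]).length ∧
        PySem.List.pyGetD (Z ++ [y]) (-((n + 1 : Nat) : Int) - 1) 0 = y - ((n + 1 : Nat) : Int)) := by
      intro hcc
      apply hc
      have hn : n < Z.length := by have := hcc.1; simp at this; omega
      have hsh : PySem.List.pyGetD (Z ++ [y]) (-((n + 1 : Nat) : Int) - 1) 0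
          = PySem.List.pyGetD Z (-(n : Int) - 1) 0 := by
        have e1 : (-((n + 1 : Nat) : Int) - 1) = -(((n + 2 : Nat)) : Int) := by push_cast; ring
        have e2 : (-(n : Int) - 1) = -(((n + 1 : Nat)) : Int) := by push_cast; ring
        rw [e1, e2,
          PySem.List.pyGetD_neg_natCast (Z ++ [y]) (n + 2) 0 (by omega) (by simp only [List.length_append, List.length_cons, List.length_nil]; omega),
          PySem.List.pyGetD_neg_natCast Z (n + 1) 0 (by omega) (by omega)]
        exact snoc_getElem Z y _ (Z.length - (n + 1)) (by simp only [List.length_append, List.length_cons, List.length_nil]; omega) (by omega) (by simp only [List.length_append, List.length_cons, List.length_nil]; omega)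
      refine ⟨hn, ?_⟩
      rw [← hsh, hcc.2, hy]; push_cast; ring
    rw [if_neg hc', if_neg hc]
termination_by Z.length - n
decreasing_by omega

-- the first inner-while step always fires (Y[-1] == Y[-1] - 0)
theorem runLenA_snoc_base (Z : List Int) (y : Int) :
    runLenA (Z ++ [y]) y 0 = runLenA (Z ++ [y]) y 1 := by
  conv_lhs => rw [runLenA]
  rw [if_pos]
  refine ⟨by simp, ?_⟩
  have : (-((0 : Nat) : Int) - 1) = (-1 : Int) := by norm_num
  rw [this, PySem.List.pyGetD_neg_one_append_singleton]
  norm_num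

theorem runLenA_singleton (y : Int) : runLenA [y] y 0 = 1 := by
  have h := runLenA_snoc_base [] y
  simp only [List.nil_append] at h
  rw [h, runLenA]
  simp

-- a new run starts: the second inner-while test fails
theorem runLenA_snoc_new (Z : List Int) (y : Int) (hZ : Z ≠ [])
    (hy : y ≠ Z.getLastD 0 + 1) : runLenA (Z ++ [y]) y 0 = 1 := by
  rw [runLenA_snoc_base, runLenA]
  rw [if_neg]
  intro hcc
  apply hy
  have hlen : 0 < Z.length := List.length_pos_iff.mpr hZ
  have e1 : (-((1 : Nat) : Int) - 1) = -(((2 : Nat)) : Int) := by norm_num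
  have h2 := hcc.2
  rw [e1, PySem.List.pyGetD_neg_natCast (Z ++ [y]) 2 0 (by omega) (by simp only [List.length_append, List.length_cons, List.length_nil]; omega)] at h2
  rw [snoc_getElem Z y _ (Z.length - 1) (by simp only [List.length_append, List.length_cons, List.length_nil]; omega) (by omega) (by simp only [List.length_append, List.length_cons, List.length_nil]; omega),
    getElem_last_getLastD Z hZ (by omega)] at h2
  push_cast at h2
  omega

-- fold state: second component is the last element seen
theorem foldRuns_snd (Z : List Int) (h : Z ≠ []) :
    (Z.foldl runStep ([], 0)).2 = Z.getLastD 0 := by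
  induction Z using List.reverseRecOn with
  | nil => cases h rfl
  | append_singleton ys y _ =>
    rw [List.foldl_append]
    simp only [List.foldl_cons, List.foldl_nil, List.getLastD_concat]
    exact runStep_snd _ y

-- run decomposition: the head of runsRev is A's inner-while count, the tail is the
-- runsRev of Y with its last maximal consecutive run removed
theorem runs_decomp (Z : List Int) (hZ : Z ≠ []) :
    runsRev Z = runLenA Z (PySem.List.pyGetD Z (-1) 0) 0
      :: runsRev (Z.take (Z.length - runLenA Z (PySem.List.pyGetD Z (-1) 0) 0)) := by
  induction Z using List.reverseRecOn with
  | nil => cases hZ rfl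
  | append_singleton Z y ih =>
    have hlast : PySem.List.pyGetD (Z ++ [y]) (-1) 0 = y :=
      PySem.List.pyGetD_neg_one_append_singleton ..
    by_cases hZ0 : Z = []
    · subst hZ0
      simp only [List.nil_append] at *
      rw [hlast, runLenA_singleton]
      simp [runsRev, runStep]
    · have hr1 : 1 ≤ runLenA Z (PySem.List.pyGetD Z (-1) 0) 0 := runLenA_pos Z hZ0
      have hrle : runLenA Z (PySem.List.pyGetD Z (-1) 0) 0 ≤ Z.length :=
        runLenA_le Z _ 0 (Nat.zero_le _)
      set r := runLenA Z (PySem.List.pyGetD Z (-1) 0) 0 with hrdef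
      have hfz := ih hZ0
      have hfst : (Z.foldl runStep ([], 0)).1 = r :: runsRev (Z.take (Z.length - r)) := hfz
      have hsnd : (Z.foldl runStep ([], 0)).2 = Z.getLastD 0 := foldRuns_snd Z hZ0
      have hrr : runsRev (Z ++ [y]) = (runStep (Z.foldl runStep ([], 0)) y).1 := by
        unfold runsRev
        rw [List.foldl_append]
        rfl
      have hgl : PySem.List.pyGetD Z (-1) 0 = Z.getLastD 0 := pyGetD_neg_one_getLastD Z hZ0
      rw [hlast]
      by_cases hy : y = Z.getLastD 0 + 1
      · have hrun : runLenA (Z ++ [y]) y 0 = r + 1 := by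
          rw [runLenA_snoc_base, runLenA_shift Z y (PySem.List.pyGetD Z (-1) 0) (by rw [hgl]; exact hy) 0]
        have hprod : Z.foldl runStep ([], 0)
            = (r :: runsRev (Z.take (Z.length - r)), Z.getLastD 0) := by
          rw [← hfst, ← hsnd]
        rw [hrun, hrr, hprod, runStep_cons_fst, if_pos hy]
        have htk : (Z ++ [y]).take ((Z ++ [y]).length - (r + 1)) = Z.take (Z.length - r) := by
          have : (Z ++ [y]).length - (r + 1) = Z.length - r := by simp
          rw [this, List.take_append_of_le_length (by omega)]
        rw [htk]
      · have hrun : runLenA (Z ++ [y]) y 0 = 1 := runLenA_snoc_new Z y hZ0 hy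
        have hprod : Z.foldl runStep ([], 0)
            = (r :: runsRev (Z.take (Z.length - r)), Z.getLastD 0) := by
          rw [← hfst, ← hsnd]
        rw [hrun, hrr, hprod, runStep_cons_fst, if_neg hy]
        have htk : (Z ++ [y]).take ((Z ++ [y]).length - 1) = Z := by
          have : (Z ++ [y]).length - 1 = Z.length := by simp
          rw [this, List.take_append_of_le_length le_rfl, List.take_length]
        rw [htk, hfz]

theorem zip_reverse_eq (a : List Int) : ∀ (b : List Int), a.length = b.length →
    a.reverse.zip b.reverse = (a.zip b).reverse := by
  induction a using List.reverseRecOn with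
  | nil =>
    intro b hb
    have hb0 : b = [] := List.eq_nil_of_length_eq_zero (by simpa using hb.symm)
    subst hb0
    simp
  | append_singleton xs x ih =>
    intro b hb
    cases b using List.reverseRecOn with
    | nil => simp at hb
    | append_singleton ys y =>
      have hlen : xs.length = ys.length := by simp at hb; omega
      simp only [List.reverse_append, List.reverse_cons, List.reverse_nil, List.nil_append]
      rw [List.singleton_append, List.singleton_append, List.zip_cons_cons,
        ih ys hlen, List.zip_append hlen]
      simp

theorem getLastD_reverse (a : List Int) : a.reverse.getLastD 0 = a.headD 0 := by
  rw [List.getLastD_eq_getLast?, List.getLast?_reverse, List.headD_eq_head?]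

theorem headD_reverse (a : List Int) : a.reverse.headD 0 = a.getLastD 0 := by
  rw [List.headD_eq_head?, List.head?_reverse, List.getLastD_eq_getLast?]

-- the bridge: A's destructive loop on the truncated lists equals B's pointer loop
theorem bridge (ye : Nat) (X Y : List Int) (xe : Nat) (s : List (Int × Int))
    (hx : xe ≤ X.length) (hy : ye ≤ Y.length) :
    loopA (X.take xe) (Y.take ye) s = loopB X Y (runsRev (Y.take ye)) xe ye s := by
  by_cases h0 : Y.take ye = []
  · have hye : ye = 0 := by
      rcases List.take_eq_nil_iff.mp h0 with h | h
      · exact h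
      · have : Y.length = 0 := by rw [h]; rfl
        omega
    subst hye
    rw [h0]
    rw [loopA, dif_pos rfl]
    show _ = loopB X Y [] xe 0 s
    unfold loopB
    by_cases hxe : xe = 0
    · subst hxe; simp
    · have : X.take xe ≠ [] := by
        intro hc
        rcases List.take_eq_nil_iff.mp hc with h | h
        · exact hxe h
        · rw [h] at hx; simp at hx; exact hxe (by omega)
      simp [this, hxe]
  · have hylen : (Y.take ye).length = ye := by simp [min_eq_left hy]
    have h1 : 1 ≤ runLenA (Y.take ye) (PySem.List.pyGetD (Y.take ye) (-1) 0) 0 :=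
      runLenA_pos _ h0
    have h2 : runLenA (Y.take ye) (PySem.List.pyGetD (Y.take ye) (-1) 0) 0 ≤ ye := by
      have hle := runLenA_le (Y.take ye) (PySem.List.pyGetD (Y.take ye) (-1) 0) 0 (Nat.zero_le _)
      rw [hylen] at hle
      exact hle
    set n := runLenA (Y.take ye) (PySem.List.pyGetD (Y.take ye) (-1) 0) 0 with hndef
    rw [runs_decomp _ h0, ← hndef]
    conv_lhs => rw [loopA]
    rw [dif_neg h0]
    show (if (X.take xe).length < n then none else _) = _
    conv_rhs => rw [loopB]
    have hxlen : (X.take xe).length = xe := by simp [min_eq_left hx]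
    rw [hxlen]
    by_cases hcond : xe < n
    · rw [if_pos hcond, if_pos hcond]
    · rw [if_neg hcond, if_neg hcond]
      have hnx : n ≤ xe := by omega
      -- identify the popped lists with B's slices
      have hxs : PySem.List.slice X (some ((xe : Int) - n)) (some (xe : Int))
          = (X.take xe).drop (xe - n) := by
        have e : (xe : Int) - n = ((xe - n : Nat) : Int) := by push_cast [hnx]; ring
        rw [e, PySem.List.slice_natCast, List.drop_take]
      have hys : PySem.List.slice Y (some ((ye : Int) - n)) (some (ye : Int))
          = (Y.take ye).drop (ye - n) := by
        have e : (ye : Int) - n = ((ye - n : Nat) : Int) := by push_cast [h2]; ring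
        rw [e, PySem.List.slice_natCast, List.drop_take]
      have hxslen : ((X.take xe).drop (xe - n)).length = n := by
        simp [min_eq_left hx]; omega
      have hyslen : ((Y.take ye).drop (ye - n)).length = n := by
        simp [min_eq_left hy]; omega
      obtain ⟨hXf, hXs⟩ := popLoopA_spec n (X.take xe) [] (by omega)
      obtain ⟨hYf, hYs⟩ := popLoopA_spec n (Y.take ye) [] (by rw [hylen]; omega)
      rw [hxlen] at hXf hXs
      rw [hylen] at hYf hYs
      simp only [List.nil_append] at hXs hYs
      simp only [← hndef, hXs, hYs, hXf, hYf, hxs, hys, hylen]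
      have hzz : (((X.take xe).drop (xe - n)).reverse.zip ((Y.take ye).drop (ye - n)).reverse)
          = (((X.take xe).drop (xe - n)).zip ((Y.take ye).drop (ye - n))).reverse :=
        zip_reverse_eq _ _ (by rw [hxslen, hyslen])
      rw [hzz, List.any_reverse]
      by_cases hany :
          ((((X.take xe).drop (xe - n)).zip ((Y.take ye).drop (ye - n))).any
            fun p => decide (p.1 > p.2)) = true
      · rw [if_pos hany, if_pos hany]
      · rw [if_neg hany, if_neg hany]
        have htX : (X.take xe).take (xe - n) = X.take (xe - n) := by
          rw [List.take_take, min_eq_left (by omega)]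
        have htY : (Y.take ye).take (ye - n) = Y.take (ye - n) := by
          rw [List.take_take, min_eq_left (by omega)]
        have hrec := bridge (ye - n) X Y (xe - n) (s ++
            [((((X.take xe).drop (xe - n))).headD 0, (((Y.take ye).drop (ye - n))).getLastD 0)])
            (by omega) (by omega)
        have hrec2 := bridge (ye - n) X Y (xe - n) s (by omega) (by omega)
        have hne : (((X.take xe).drop (xe - n)).reverse ≠ ((Y.take ye).drop (ye - n)).reverse)
            ↔ (((X.take xe).drop (xe - n)) ≠ ((Y.take ye).drop (ye - n))) :=
          not_congr List.reverse_inj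
        by_cases hdiff : ((X.take xe).drop (xe - n)) = ((Y.take ye).drop (ye - n))
        · rw [if_neg (by simp [hdiff]), if_neg (by simp [hdiff])]
          rw [htX, htY] at *
          exact hrec2
        · rw [if_pos (hne.mpr hdiff), if_pos hdiff]
          rw [getLastD_reverse, headD_reverse]
          rw [htX, htY] at *
          exact hrec
  termination_by ye
  decreasing_by all_goals omega

-- ===== VERDICT (by name: the statement is the Claim_ definition above) =====
theorem solve_spec : Claim_equal_solve := by
  intro N A B _ _
  unfold Spec_solve solve solve_alt
  have h := bridge
    (((PySem.List.pyRange 0 N 1).filter (fun i => PySem.List.pyGetD B i 0 ≠ 0)).length)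
    ((PySem.List.pyRange 0 N 1).filter (fun i => PySem.List.pyGetD A i 0 ≠ 0))
    ((PySem.List.pyRange 0 N 1).filter (fun i => PySem.List.pyGetD B i 0 ≠ 0))
    (((PySem.List.pyRange 0 N 1).filter (fun i => PySem.List.pyGetD A i 0 ≠ 0)).length)
    [] le_rfl le_rfl
  rw [List.take_length, List.take_length] at h
  exact h
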